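-- pv_equiv track=rewrite | github.com/yumoxu/lqsum | bottom_up/preprocess_copy_bpe.py | make_BIO_tgt_with_all
-- ===== SOURCE A (Python) =====
-- from collections import Counter
--
-- def compile_substring(start, end, split):
--     if start == end:
--         return split[start]
--     return " ".join(split[start:end+1])
--
-- def make_BIO_tgt_with_all(s, t):
--     # tsplit = t.split()
--     ssplit = s#.split()
--     startix = 0
--     endix = 0
--     matches = []
--     matchstrings = Counter()
--     while endix < len(ssplit):
--         # last check is to make sure that phrases at end can be copied
--         searchstring = compile_substring(startix, endix, ssplit)
--         if searchstring in t \
--             and endix < len(ssplit)-1: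
--             endix +=1
--         else:
--             # only phrases, not words
--             # uncomment the -1 if you only want phrases > len 1
--             if startix >= endix:#-1:
--                 matches.extend(["0"] * (endix-startix + 1))
--                 endix += 1
--             else:
--                 # First one has to be 2 if you want phrases not words
--                 full_string = compile_substring(startix, endix-1, ssplit)
--                 matches.extend(["1"]*(endix-startix))
--                 matchstrings[full_string] +=1
--                 #endix += 1
--             startix = endix
--     return " ".join(matches)
-- ===== SOURCE B (Python) =====
-- def make_BIO_tgt_with_all(s, t):
--     # Greedy BIO tagging via incremental occurrence-position filtering:
--     # instead of re-joining the window and re-scanning t for every growth step,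
--     # keep the list of positions where the current window occurs in t and
--     # filter it as the window grows by one token.
--     n = len(s)
--     tags = []
--     i = 0
--     while i < n:
--         w = s[i]
--         L = len(w)
--         occs = [p for p in range(len(t) + 1) if t[p:p+L] == w]
--         e = i
--         while occs and e < n - 1:
--             e += 1
--             w = s[e]
--             occs = [p for p in occs
--                     if t[p+L:p+L+1] == " " and t[p+L+1:p+L+1+len(w)] == w]
--             L += 1 + len(w)
--         if e == i:
--             tags.append("0")
--             i += 1
--         else:
--             tags.extend(["1"] * (e - i))
--             i = e
--     return " ".join(tags)
-- ===== Notes on version B (the rewrite author's own statement) =====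
-- stated objective: alternative
-- what changed: Instead of re-joining the window and re-scanning t with 'in' at every growth step, B maintains the list of positions where the current window occurs in t and filters it incrementally as the window grows one token; the Counter bookkeeping that never reaches the return value is dropped.
import Mathlib
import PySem

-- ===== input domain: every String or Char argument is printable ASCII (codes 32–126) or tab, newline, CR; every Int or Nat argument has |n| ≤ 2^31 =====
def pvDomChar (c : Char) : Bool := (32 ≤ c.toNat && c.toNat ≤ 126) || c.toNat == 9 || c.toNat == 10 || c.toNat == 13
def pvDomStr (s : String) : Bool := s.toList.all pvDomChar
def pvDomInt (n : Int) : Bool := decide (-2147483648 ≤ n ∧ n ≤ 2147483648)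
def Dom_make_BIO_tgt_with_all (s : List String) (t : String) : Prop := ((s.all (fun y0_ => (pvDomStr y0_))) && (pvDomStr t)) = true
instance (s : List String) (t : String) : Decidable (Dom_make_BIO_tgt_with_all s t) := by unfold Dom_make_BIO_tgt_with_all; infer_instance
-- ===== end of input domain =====

-- B replaces A's per-step re-join + full substring scan by an incremental list of
-- occurrence positions of the current window in t, filtered as the window grows
-- (objective: alternative algorithm, same results; A's Counter never reaches the
-- return value and is dropped in B).

-- ===== PORT A =====
-- s[start] is always in range at A's call sites, so the `.getD ""` default is never used.
def compile_substring (start «end» : Int) (split : List String) : String :=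
  if start == «end» then (PySem.List.pyGet? split start).getD ""
  else PySem.Str.join " " (PySem.List.slice split (some start) (some («end» + 1)))

def loopA (ssplit : List String) (t : String) (fuel : Nat) (startix endix : Nat)
    (matches_ : List String) (matchstrings : PySem.Dict String Int) : List String :=
  match fuel with
  | 0 => matches_
  | fuel + 1 =>
    if endix < ssplit.length then
      if PySem.Str.isIn (compile_substring (startix : Int) (endix : Int) ssplit) t
          && decide (endix < ssplit.length - 1) then
        loopA ssplit t fuel startix (endix + 1) matches_ matchstrings
      else
        if startix ≥ endix then
          loopA ssplit t fuel (endix + 1) (endix + 1)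
            (matches_ ++ List.replicate (endix - startix + 1) "0") matchstrings
        else
          loopA ssplit t fuel endix endix
            (matches_ ++ List.replicate (endix - startix) "1")
            (matchstrings.modify (compile_substring (startix : Int) ((endix : Int) - 1) ssplit) 0 (· + 1))
    else matches_

-- fuel 2*len+1 provably dominates the loop's decreasing measure 2*(len-endix)+(endix-startix)
def make_BIO_tgt_with_all (s : List String) (t : String) : String :=
  PySem.Str.join " " (loopA s t (2 * s.length + 1) 0 0 [] PySem.Dict.empty)

-- ===== PORT B =====
-- inner `while occs and e < n - 1` loop of Source B; only e is used after the loop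
-- (fuel s.length dominates the number of iterations: e increases and stays below s.length - 1).
def innerB (s : List String) (t : String) (fuel : Nat) (e : Nat) (L : Int) (occs : List Int) : Nat :=
  match fuel with
  | 0 => e
  | fuel + 1 =>
    if occs ≠ [] ∧ e < s.length - 1 then
      innerB s t fuel (e + 1) (L + 1 + (PySem.Str.len (s.getD (e + 1) "") : Int))
        (occs.filter (fun p =>
          PySem.Str.slice t (some (p + L)) (some (p + L + 1)) == " " &&
          PySem.Str.slice t (some (p + L + 1)) (some (p + L + 1 + (PySem.Str.len (s.getD (e + 1) "") : Int)))
            == s.getD (e + 1) ""))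
    else e

-- initial occurrence positions of window word w = s[i] in t (Source B's first list comprehension)
def occs0 (t : String) (w : String) : List Int :=
  (PySem.List.pyRange 0 ((PySem.Str.len t : Int) + 1) 1).filter
    (fun p => PySem.Str.slice t (some p) (some (p + (PySem.Str.len w : Int))) == w)

-- outer `while i < n` loop of Source B (fuel s.length + 1 dominates: i strictly increases each iteration)
def outerB (s : List String) (t : String) (fuel : Nat) (i : Nat) (tags : List String) : List String :=
  match fuel with
  | 0 => tags
  | fuel + 1 =>
    if i < s.length then
      if innerB s t s.length i (PySem.Str.len (s.getD i "") : Int) (occs0 t (s.getD i "")) == i then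
        outerB s t fuel (i + 1) (tags ++ ["0"])
      else
        outerB s t fuel (innerB s t s.length i (PySem.Str.len (s.getD i "") : Int) (occs0 t (s.getD i "")))
          (tags ++ List.replicate
            (innerB s t s.length i (PySem.Str.len (s.getD i "") : Int) (occs0 t (s.getD i "")) - i) "1")
    else tags

def make_BIO_tgt_with_all_alt (s : List String) (t : String) : String :=
  PySem.Str.join " " (outerB s t (s.length + 1) 0 [])

-- ===== PRECONDITION & SPEC =====
def Spec_make_BIO_tgt_with_all (s : List String) (t : String) (out : String) : Prop := out = make_BIO_tgt_with_all_alt s t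
instance (s : List String) (t : String) (out : String) : Decidable (Spec_make_BIO_tgt_with_all s t out) := by unfold Spec_make_BIO_tgt_with_all; infer_instance

-- ===== CLAIM (what is proved, stated in full; the proofs are below) =====
def Claim_equal_make_BIO_tgt_with_all : Prop := ∀ (s : List String) (t : String), Dom_make_BIO_tgt_with_all s t → Spec_make_BIO_tgt_with_all s t (make_BIO_tgt_with_all s t)

-- ===== LEMMAS AND PROOFS =====

-- the joined window s[i..e] as a list of chars (what A's compile_substring builds)
def JC (s : List String) (i e : Nat) : List Char :=
  PySem.Chars.join [' '] (((s.drop i).take (e + 1 - i)).map String.toList)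

-- spec-level form of B's occurrence-position list for a window string x
def specOcc (tl : List Char) (x : List Char) : List Int :=
  (PySem.List.pyRange 0 ((tl.length : Int) + 1) 1).filter
    (fun p => decide ((tl.drop p.toNat).take x.length = x))

-- the index at which A's window growth from (i, e) stops (exact-fuel recursion on s.length - 1 - e)
def growStopGo (s : List String) (t : String) (i : Nat) : Nat → Nat → Nat
  | 0, e => e
  | f + 1, e =>
    if e < s.length - 1 then
      if PySem.Chars.isIn (JC s i e) t.toList then growStopGo s t i f (e + 1) else e
    else e

def growStop (s : List String) (t : String) (i e : Nat) : Nat :=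
  growStopGo s t i (s.length - 1 - e) e

lemma growStop_eq (s : List String) (t : String) (i e : Nat) :
    growStop s t i e =
      if e < s.length - 1 then
        (if PySem.Chars.isIn (JC s i e) t.toList then growStop s t i (e + 1) else e)
      else e := by
  unfold growStop
  by_cases h : e < s.length - 1
  · rw [show s.length - 1 - e = (s.length - 1 - (e + 1)) + 1 from by omega]
    rw [growStopGo, if_pos h]
  · rw [show s.length - 1 - e = 0 from by omega]
    rw [growStopGo, if_neg h]

lemma growStopGo_ge (s : List String) (t : String) (i : Nat) :
    ∀ f e, e ≤ growStopGo s t i f e := by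
  intro f
  induction f with
  | zero => intro e; rw [growStopGo]
  | succ f ih =>
    intro e
    rw [growStopGo]
    split
    · split
      · exact le_trans (by omega) (ih (e + 1))
      · exact le_refl e
    · exact le_refl e

lemma growStop_ge (s : List String) (t : String) (i e : Nat) : e ≤ growStop s t i e :=
  growStopGo_ge s t i _ e

lemma str_beq_toList (a b : String) : (a == b) = decide (a.toList = b.toList) := by
  rw [Bool.eq_iff_iff]
  simp [String.ext_iff]

lemma take_append_iff {α : Type} (d u v : List α) :
    d.take (u.length + v.length) = u ++ v ↔
      d.take u.length = u ∧ (d.drop u.length).take v.length = v := by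
  constructor
  · intro h
    have hlen : u.length + v.length ≤ d.length := by
      have := congrArg List.length h
      simp at this
      omega
    rw [List.take_add] at h
    have h1 : (d.take u.length).length = u.length := by simp; omega
    exact List.append_inj h h1
  · rintro ⟨h1, h2⟩
    rw [List.take_add, h1, h2]

lemma infix_iff_exists (x tl : List Char) :
    x <:+: tl ↔ ∃ k, k ≤ tl.length ∧ (tl.drop k).take x.length = x := by
  constructor
  · rintro ⟨u, v, rfl⟩
    refine ⟨u.length, by simp, ?_⟩
    rw [List.append_assoc, List.drop_left, List.take_left]
  · rintro ⟨k, hk, h⟩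
    have h2 : x ++ (tl.drop k).drop x.length = tl.drop k := by
      nth_rewrite 1 [← h]
      exact List.take_append_drop _ _
    refine ⟨tl.take k, (tl.drop k).drop x.length, ?_⟩
    rw [List.append_assoc, h2, List.take_append_drop]

lemma specOcc_eq_nil_iff (tl x : List Char) : specOcc tl x = [] ↔ ¬ x <:+: tl := by
  unfold specOcc
  rw [List.filter_eq_nil_iff]
  constructor
  · intro h hcontra
    obtain ⟨k, hk, he⟩ := (infix_iff_exists x tl).mp hcontra
    have hmem : (k : Int) ∈ PySem.List.pyRange 0 ((tl.length : Int) + 1) 1 :=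
      PySem.List.mem_pyRange_one.mpr ⟨by omega, by omega⟩
    have := h _ hmem
    simp at this
    exact this he
  · intro h p hp
    obtain ⟨hp0, hp1⟩ := PySem.List.mem_pyRange_one.mp hp
    simp only [decide_eq_true_eq]
    intro he
    exact h ((infix_iff_exists x tl).mpr ⟨p.toNat, by omega, he⟩)

lemma occs0_eq (t w : String) : occs0 t w = specOcc t.toList w.toList := by
  unfold occs0 specOcc
  rw [PySem.Str.len_eq t]
  apply List.filter_congr
  intro p hp
  obtain ⟨hp0, hp1⟩ := PySem.List.mem_pyRange_one.mp hp
  obtain ⟨k, rfl⟩ : ∃ k : Nat, p = (k : Int) := ⟨p.toNat, (Int.toNat_of_nonneg hp0).symm⟩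
  rw [str_beq_toList, decide_eq_decide]
  rw [PySem.Str.len_eq w]
  rw [show ((PySem.Str.slice t (some (k : Int)) (some ((k : Int) + (w.toList.length : Int)))).toList
        = (t.toList.drop k).take w.toList.length) from by
    simp [PySem.List.slice_natCast_add]]
  simp

lemma specOcc_filter_step (t : String) (x : List Char) (w : String) :
    (specOcc t.toList x).filter (fun p =>
        PySem.Str.slice t (some (p + (x.length : Int))) (some (p + (x.length : Int) + 1)) == " " &&
        PySem.Str.slice t (some (p + (x.length : Int) + 1))
            (some (p + (x.length : Int) + 1 + PySem.Str.len w)) == w)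
      = specOcc t.toList (x ++ ' ' :: w.toList) := by
  unfold specOcc
  rw [List.filter_filter]
  apply List.filter_congr
  intro p hp
  obtain ⟨hp0, hp1⟩ := PySem.List.mem_pyRange_one.mp hp
  obtain ⟨k, rfl⟩ : ∃ k : Nat, p = (k : Int) := ⟨p.toNat, (Int.toNat_of_nonneg hp0).symm⟩
  have hs1 : (PySem.Str.slice t (some ((k : Int) + (x.length : Int)))
      (some ((k : Int) + (x.length : Int) + 1))).toList
      = (t.toList.drop (k + x.length)).take 1 := by
    rw [PySem.Str.toList_slice, PySem.Chars.slice_eq_listSlice]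
    rw [PySem.List.slice_toNat _ (by positivity) (by positivity)]
    rw [show ((k : Int) + (x.length : Int)).toNat = k + x.length from by omega]
    rw [show ((k : Int) + (x.length : Int) + 1).toNat = k + x.length + 1 from by omega]
    rw [show k + x.length + 1 - (k + x.length) = 1 from by omega]
  have hs2 : (PySem.Str.slice t (some ((k : Int) + (x.length : Int) + 1))
      (some ((k : Int) + (x.length : Int) + 1 + PySem.Str.len w))).toList
      = (t.toList.drop (k + x.length + 1)).take w.toList.length := by
    rw [PySem.Str.len_eq w]
    rw [PySem.Str.toList_slice, PySem.Chars.slice_eq_listSlice]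
    rw [PySem.List.slice_toNat _ (by positivity) (by positivity)]
    rw [show ((k : Int) + (x.length : Int) + 1).toNat = k + x.length + 1 from by omega]
    rw [show ((k : Int) + (x.length : Int) + 1 + (w.toList.length : Int)).toNat
        = k + x.length + 1 + w.toList.length from by omega]
    rw [show k + x.length + 1 + w.toList.length - (k + x.length + 1) = w.toList.length
        from by omega]
  have hC : ((t.toList.drop k).take (x ++ ' ' :: w.toList).length = x ++ ' ' :: w.toList) ↔
      (((t.toList.drop k).take x.length = x) ∧
        ((t.toList.drop (k + x.length)).take 1 = [' ']) ∧
        ((t.toList.drop (k + x.length + 1)).take w.toList.length = w.toList)) := by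
    rw [show (x ++ ' ' :: w.toList).length = x.length + (' ' :: w.toList).length from by simp]
    rw [take_append_iff, List.drop_drop]
    rw [show (' ' :: w.toList) = [' '] ++ w.toList from rfl]
    rw [show ([' '] ++ w.toList).length = ([' '] : List Char).length + w.toList.length from by
      simp [Nat.add_comm]]
    rw [take_append_iff, List.drop_drop]
    rw [show k + x.length + ([' '] : List Char).length = k + x.length + 1 from rfl]
    rw [show ([' '] : List Char).length = 1 from rfl]
  rw [Bool.eq_iff_iff]
  simp only [Bool.and_eq_true, decide_eq_true_eq, str_beq_toList, Int.toNat_natCast]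
  rw [hs1, hs2, show (" " : String).toList = [' '] from rfl, hC]
  exact ⟨fun ⟨⟨b1, b2⟩, a1⟩ => ⟨a1, b1, b2⟩, fun ⟨a1, b1, b2⟩ => ⟨⟨b1, b2⟩, a1⟩⟩

lemma join_append_singleton (ys : List (List Char)) (z : List Char) (h : ys ≠ []) :
    PySem.Chars.join [' '] (ys ++ [z]) = PySem.Chars.join [' '] ys ++ ' ' :: z := by
  induction ys with
  | nil => exact absurd rfl h
  | cons a tail ih =>
    cases tail with
    | nil => simp [PySem.Chars.join_cons_cons, PySem.Chars.join_singleton]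
    | cons b rest =>
      have ih' := ih (by simp)
      rw [List.cons_append] at ih'
      rw [List.cons_append, List.cons_append, PySem.Chars.join_cons_cons, ih',
        PySem.Chars.join_cons_cons]
      simp

lemma JC_single (s : List String) (i : Nat) (h : i < s.length) :
    JC s i i = (s.getD i "").toList := by
  unfold JC
  rw [show i + 1 - i = 1 from by omega]
  rw [List.drop_eq_getElem_cons h]
  simp only [List.take_succ_cons, List.take_zero, List.map_cons, List.map_nil,
    PySem.Chars.join_singleton]
  rw [List.getD_eq_getElem s "" h]

lemma JC_snoc (s : List String) (i e : Nat) (h1 : i ≤ e) (h2 : e + 1 < s.length) :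
    JC s i (e + 1) = JC s i e ++ ' ' :: (s.getD (e + 1) "").toList := by
  unfold JC
  rw [show e + 1 + 1 - i = (e + 1 - i) + 1 from by omega]
  rw [List.take_add_one]
  have hg : (s.drop i)[e + 1 - i]? = some (s.getD (e + 1) "") := by
    rw [List.getElem?_drop]
    rw [show i + (e + 1 - i) = e + 1 from by omega]
    rw [List.getElem?_eq_getElem h2, List.getD_eq_getElem _ _ h2]
  rw [hg]
  simp only [Option.toList_some, List.map_append, List.map_cons, List.map_nil]
  apply join_append_singleton
  simp only [ne_eq, List.map_eq_nil_iff]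
  intro hnil
  have := congrArg List.length hnil
  simp at this
  omega

lemma compile_toList (s : List String) (i e : Nat) (h1 : i ≤ e) (h2 : e < s.length) :
    (compile_substring (i : Int) (e : Int) s).toList = JC s i e := by
  unfold compile_substring
  by_cases hie : i = e
  · subst hie
    rw [if_pos (by simp)]
    rw [PySem.List.pyGet?_natCast, List.getElem?_eq_getElem h2]
    rw [JC_single s i h2, List.getD_eq_getElem s "" h2]
    rfl
  · rw [if_neg (by simp [hie])]
    rw [PySem.Str.toList_join]
    rw [show ((e : Int) + 1) = ((i : Int) + ((e + 1 - i : Nat) : Int)) from by omega]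
    rw [PySem.List.slice_natCast_add]
    rfl

lemma inner_sim (s : List String) (t : String) (i : Nat) :
    ∀ fuel e, i ≤ e → e < s.length → s.length - 1 - e < fuel →
    innerB s t fuel e ((JC s i e).length : Int) (specOcc t.toList (JC s i e))
      = growStop s t i e := by
  intro fuel
  induction fuel with
  | zero => intro e _ _ hf; omega
  | succ fuel ih =>
    intro e h1 h2 hf
    rw [growStop_eq]
    by_cases hlt : e < s.length - 1
    · by_cases hin : PySem.Chars.isIn (JC s i e) t.toList = true
      · have hne : specOcc t.toList (JC s i e) ≠ [] := by
          intro hnil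
          exact (specOcc_eq_nil_iff _ _).mp hnil ((PySem.Chars.isIn_iff_infix _ _).mp hin)
        rw [innerB, if_pos ⟨hne, hlt⟩]
        have hstep := specOcc_filter_step t (JC s i e) (s.getD (e + 1) "")
        rw [hstep, ← JC_snoc s i e h1 (by omega)]
        have hlen : (JC s i (e + 1)).length
            = (JC s i e).length + 1 + (s.getD (e + 1) "").toList.length := by
          rw [JC_snoc s i e h1 (by omega)]
          simp
          omega
        rw [show ((JC s i e).length : Int) + 1 + PySem.Str.len (s.getD (e + 1) "")
              = ((JC s i (e + 1)).length : Int) from by rw [PySem.Str.len_eq]; omega]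
        rw [ih (e + 1) (by omega) (by omega) (by omega)]
        rw [if_pos hlt, if_pos hin]
      · have hnil : specOcc t.toList (JC s i e) = [] := (specOcc_eq_nil_iff _ _).mpr (by
          intro hinf
          exact hin ((PySem.Chars.isIn_iff_infix _ _).mpr hinf))
        rw [innerB, if_neg (by simp [hnil])]
        rw [if_pos hlt, if_neg hin]
    · rw [innerB, if_neg (fun hc => hlt hc.2)]
      rw [if_neg hlt]

lemma loopA_ms_irrel (s : List String) (t : String) :
    ∀ fuel i e (acc : List String) (ms ms' : PySem.Dict String Int),
    loopA s t fuel i e acc ms = loopA s t fuel i e acc ms' := by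
  intro fuel
  induction fuel with
  | zero => intro i e acc ms ms'; rw [loopA, loopA]
  | succ fuel ih =>
    intro i e acc ms ms'
    rw [loopA]
    conv_rhs => rw [loopA]
    split
    · split
      · exact ih i (e + 1) acc ms ms'
      · split
        · exact ih (e + 1) (e + 1) _ ms ms'
        · exact ih e e _ _ _
    · rfl

lemma loopA_fuel (s : List String) (t : String) :
    ∀ fuel fuel' i e (acc : List String) (ms : PySem.Dict String Int),
    2 * (s.length - e) + (e - i) < fuel → 2 * (s.length - e) + (e - i) < fuel' →
    loopA s t fuel i e acc ms = loopA s t fuel' i e acc ms := by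
  intro fuel
  induction fuel with
  | zero => intro fuel' i e acc ms hf _; omega
  | succ fuel ih =>
    intro fuel' i e acc ms hf hf'
    cases fuel' with
    | zero => omega
    | succ fuel' =>
      rw [loopA]
      conv_rhs => rw [loopA]
      by_cases he : e < s.length
      · rw [if_pos he, if_pos he]
        split
        · next hc =>
          have hlt : e < s.length - 1 := by
            have := (Bool.and_eq_true _ _).mp hc
            simpa using this.2
          exact ih fuel' i (e + 1) acc ms (by omega) (by omega)
        · split
          · exact ih fuel' (e + 1) (e + 1) _ ms (by omega) (by omega)
          · next hge =>
            have : i < e := by omega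
            exact ih fuel' e e _ _ (by omega) (by omega)
      · rw [if_neg he, if_neg he]

lemma loopA_grow (s : List String) (t : String) (i : Nat) :
    ∀ fuel e (acc : List String) (ms : PySem.Dict String Int), i ≤ e → e < s.length →
    2 * (s.length - e) + (e - i) < fuel →
    loopA s t fuel i e acc ms =
      if growStop s t i e = i then
        loopA s t (2 * s.length + 1) (i + 1) (i + 1) (acc ++ ["0"]) ms
      else loopA s t (2 * s.length + 1) (growStop s t i e) (growStop s t i e)
        (acc ++ List.replicate (growStop s t i e - i) "1") ms := by
  intro fuel
  induction fuel with
  | zero => intro e acc ms _ _ hf; omega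
  | succ fuel ih =>
    intro e acc ms h1 h2 hf
    have hcomp : PySem.Str.isIn (compile_substring (i : Int) (e : Int) s) t
        = PySem.Chars.isIn (JC s i e) t.toList := by
      rw [PySem.Str.isIn_eq, compile_toList s i e h1 h2]
    by_cases hcond : PySem.Chars.isIn (JC s i e) t.toList = true ∧ e < s.length - 1
    · rw [loopA, if_pos h2]
      rw [if_pos (by rw [hcomp, hcond.1]; simp [hcond.2])]
      rw [ih e.succ acc ms (by omega) (by omega) (by omega)]
      have hg : growStop s t i e = growStop s t i (e + 1) := by
        rw [growStop_eq, if_pos hcond.2, if_pos hcond.1]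
      rw [hg]
    · have hg : growStop s t i e = e := by
        rw [growStop_eq]
        split
        · next h' => rw [if_neg (fun hin => hcond ⟨hin, h'⟩)]
        · rfl
      rw [loopA, if_pos h2]
      have hfalse : (PySem.Str.isIn (compile_substring (i : Int) (e : Int) s) t
          && decide (e < s.length - 1)) = false := by
        rw [hcomp]
        cases hb : PySem.Chars.isIn (JC s i e) t.toList
        · simp
        · simp only [Bool.true_and]
          exact decide_eq_false (fun hlt => hcond ⟨hb, hlt⟩)
      rw [if_neg (by rw [hfalse]; simp)]
      rw [hg]
      by_cases hge : i ≥ e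
      · have hie : i = e := le_antisymm h1 hge
        subst hie
        rw [if_pos hge, if_pos rfl]
        rw [show i - i + 1 = 1 from by omega]
        rw [show (List.replicate 1 "0" : List String) = ["0"] from rfl]
        exact loopA_fuel s t fuel (2 * s.length + 1) (i + 1) (i + 1) _ ms
          (by omega) (by omega)
      · rw [if_neg hge, if_neg (show ¬ e = i from by omega)]
        rw [loopA_ms_irrel s t fuel e e (acc ++ List.replicate (e - i) "1") _ ms]
        exact loopA_fuel s t fuel (2 * s.length + 1) e e _ ms (by omega) (by omega)

lemma main_sim (s : List String) (t : String) :
    ∀ fuel i (acc : List String) (ms : PySem.Dict String Int), s.length - i < fuel →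
    loopA s t (2 * s.length + 1) i i acc ms = outerB s t fuel i acc := by
  intro fuel
  induction fuel with
  | zero => intro i acc ms hf; omega
  | succ fuel ih =>
    intro i acc ms hf
    rw [outerB]
    by_cases hi : i < s.length
    · rw [if_pos hi]
      have hinner : innerB s t s.length i (PySem.Str.len (s.getD i "")) (occs0 t (s.getD i ""))
          = growStop s t i i := by
        have h := inner_sim s t i s.length i le_rfl hi (by omega)
        rw [JC_single s i hi] at h
        rw [occs0_eq, PySem.Str.len_eq]
        exact h
      rw [hinner]
      rw [loopA_grow s t i (2 * s.length + 1) i acc ms le_rfl hi (by omega)]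
      by_cases hgi : growStop s t i i = i
      · rw [if_pos hgi, if_pos (by simp [hgi])]
        exact ih (i + 1) (acc ++ ["0"]) ms (by omega)
      · rw [if_neg hgi, if_neg (by simp [hgi])]
        exact ih (growStop s t i i) (acc ++ List.replicate (growStop s t i i - i) "1") ms
          (by have := growStop_ge s t i i; omega)
    · rw [if_neg hi]
      rw [show 2 * s.length + 1 = (2 * s.length) + 1 from rfl, loopA, if_neg hi]

-- ===== VERDICT (by name: the statement is the Claim_ definition above) =====
theorem make_BIO_tgt_with_all_spec : Claim_equal_make_BIO_tgt_with_all := by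
  intro s t _
  unfold Spec_make_BIO_tgt_with_all make_BIO_tgt_with_all make_BIO_tgt_with_all_alt
  rw [main_sim s t (s.length + 1) 0 [] PySem.Dict.empty (by omega)]
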